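-- pv_equiv track=rewrite | github.com/seprogramd14/baekjoon | 프로그래머스/lv0/120956. 옹알이 （1）/옹알이 （1）.py | solution
-- ===== SOURCE A (Python) =====
-- def solution(babbling):
--     babb = ['aya', 'ye', 'woo', 'ma']
--     answer = []
--     for i in babbling:
--         for b in babb:
--             i = i.replace(b, '1')
--         answer.append(i.replace('1', ''))
--     return answer.count('')
-- ===== SOURCE B (Python) =====
-- def solution(babbling):
--     # One greedy left-to-right scan per string: the four words start with four
--     # distinct letters, so at each position at most one word can match and a
--     # single deterministic pass decides decomposability.
--     def ok(w):
--         i, n = 0, len(w)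
--         while i < n:
--             if w.startswith('aya', i):
--                 i += 3
--             elif w.startswith('ye', i):
--                 i += 2
--             elif w.startswith('woo', i):
--                 i += 3
--             elif w.startswith('ma', i):
--                 i += 2
--             else:
--                 return False
--         return True
--     return sum(ok(w) for w in babbling)
-- ===== Notes on version B (the rewrite author's own statement) =====
-- stated objective: alternative
-- what changed: B replaces A's four sequential whole-string replace passes plus marker-deletion-and-count by a single greedy left-to-right scan per string that consumes one babbling word at a time (the four words start with distinct letters, so the scan is deterministic).
-- intended difference: On lists containing a string that is a concatenation of aya/ye/woo/ma/'1' and contains the character '1' (e.g. ["1"]), A counts that string as pronounceable because the input text collides with A's internal replace marker '1', while B does not count it; B's value is the intended one since '1' is not a babbling word. — e.g. on solution(["1"]): A returns 1, B returns 0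
import Mathlib
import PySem

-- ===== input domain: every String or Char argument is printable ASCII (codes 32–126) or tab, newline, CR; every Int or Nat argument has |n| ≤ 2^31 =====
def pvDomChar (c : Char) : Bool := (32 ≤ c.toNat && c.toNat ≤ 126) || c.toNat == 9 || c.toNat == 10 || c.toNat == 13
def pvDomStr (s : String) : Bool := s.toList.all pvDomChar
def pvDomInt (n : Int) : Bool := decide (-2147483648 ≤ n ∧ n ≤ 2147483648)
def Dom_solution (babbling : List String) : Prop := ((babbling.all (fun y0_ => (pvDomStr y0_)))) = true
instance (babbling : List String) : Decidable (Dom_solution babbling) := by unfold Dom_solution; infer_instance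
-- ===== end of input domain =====

-- B replaces A's four sequential replace passes by one greedy left-to-right scan per string
-- (alternative algorithm, similar cost); outside D_solution below the two agree exactly.

-- ===== PORT A =====
def solution (babbling : List String) : Int :=
  let babb := ["aya", "ye", "woo", "ma"]
  let answer := babbling.foldl (fun answer i =>
    let i2 := babb.foldl (fun i b => PySem.Str.replace i b "1") i
    answer ++ [PySem.Str.replace i2 "1" ""]) []
  (PySem.List.count answer "" : Int)

-- ===== PORT B =====
-- port of Source B's `ok`: while-loop over index i, w.startswith(word, i) = word.isPrefixOf (w.drop i).
-- fuel = w.length only makes the loop total: every iteration moves i forward by ≥ 2.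
def okLoop (w : List Char) : Nat → Nat → Bool
  | fuel+1, i =>
      if i < w.length then
        if ['a','y','a'].isPrefixOf (w.drop i) then okLoop w fuel (i+3)
        else if ['y','e'].isPrefixOf (w.drop i) then okLoop w fuel (i+2)
        else if ['w','o','o'].isPrefixOf (w.drop i) then okLoop w fuel (i+3)
        else if ['m','a'].isPrefixOf (w.drop i) then okLoop w fuel (i+2)
        else false
      else true
  | 0, i => decide ¬(i < w.length)

def solution_alt (babbling : List String) : Int :=
  babbling.foldl (fun acc w => if okLoop w.toList w.toList.length 0 then acc + 1 else acc) 0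

-- ===== PRECONDITION & SPEC =====
-- greedy recognizer of (1|aya|ye|woo|ma)* — the strings A's replace pipeline reduces to nothing
def okA1 : List Char → Bool
  | [] => true
  | '1' :: t
  | 'a' :: 'y' :: 'a' :: t
  | 'y' :: 'e' :: t
  | 'w' :: 'o' :: 'o' :: t
  | 'm' :: 'a' :: t => okA1 t
  | _ => false

-- On lists containing a string that is a concatenation of aya/ye/woo/ma/'1' and contains the
-- character '1', A counts that string as pronounceable (input text collides with A's replace
-- marker '1') while B does not; B's value is the intended one ('1' is not a babbling word).
def D_solution (babbling : List String) : Prop :=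
  ∃ w ∈ babbling, '1' ∈ w.toList ∧ okA1 w.toList
instance (babbling : List String) : Decidable (D_solution babbling) := by
  unfold D_solution; infer_instance

def Spec_solution (babbling : List String) (out : Int) : Prop :=
  ¬ D_solution babbling → out = solution_alt babbling
instance (babbling : List String) (out : Int) : Decidable (Spec_solution babbling out) := by
  unfold Spec_solution; infer_instance

def pvDiffWitness_solution : List String := ["1"]
def pvDiffWitnessOut_solution : Int × Int := (1, 0)

-- ===== CLAIM (what is proved, stated in full; the proofs are below) =====
def Claim_unchanged_solution : Prop :=
  ∀ (babbling : List String), Dom_solution babbling → Spec_solution babbling (solution babbling)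
def Claim_changed_solution : Prop :=
  Dom_solution (pvDiffWitness_solution) ∧ D_solution (pvDiffWitness_solution) ∧
  solution (pvDiffWitness_solution) = pvDiffWitnessOut_solution.1 ∧
  solution_alt (pvDiffWitness_solution) = pvDiffWitnessOut_solution.2 ∧
  pvDiffWitnessOut_solution.1 ≠ pvDiffWitnessOut_solution.2
def Claim_exact_solution : Prop :=
  ∀ (babbling : List String), Dom_solution babbling → D_solution babbling →
    solution babbling ≠ solution_alt babbling

-- ===== LEMMAS AND PROOFS =====

lemma go_spec (old new : List Char) (hold : old ≠ []) :
    ∀ (fuel : Nat) (l acc : List Char), l.length ≤ fuel →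
      PySem.Chars.replace.go old new fuel l acc =
        acc.reverse ++ PySem.Chars.replace.go old new l.length l [] := by
  intro fuel
  induction fuel using Nat.strong_induction_on with
  | _ fuel ih =>
    intro l acc hl
    match fuel, l with
    | 0, l =>
      have hl0 : l = [] := by simpa using List.length_eq_zero_iff.mp (Nat.le_zero.mp hl)
      subst hl0; simp [PySem.Chars.replace.go]
    | (fuel+1), [] => simp [PySem.Chars.replace.go]
    | (fuel+1), (c :: t) =>
      have hlen : t.length ≤ fuel := by simpa using hl
      have holdpos : 0 < old.length := List.length_pos_of_ne_nil hold
      by_cases hp : old.isPrefixOf (c :: t)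
      all_goals simp only [List.length_cons]
      · have hd : (List.drop old.length (c :: t)).length ≤ t.length := by
          simp [List.length_drop]; omega
        rw [show PySem.Chars.replace.go old new (fuel+1) (c::t) acc
            = PySem.Chars.replace.go old new fuel (List.drop old.length (c::t)) (new.reverse ++ acc) by
          simp [PySem.Chars.replace.go, hp]]
        rw [show PySem.Chars.replace.go old new (t.length+1) (c::t) []
            = PySem.Chars.replace.go old new t.length (List.drop old.length (c::t)) (new.reverse ++ []) by
          simp [PySem.Chars.replace.go, hp]]
        rw [ih fuel (Nat.lt_succ_self _) _ _ (le_trans hd hlen),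
            ih t.length (Nat.lt_succ_of_le hlen) _ _ hd]
        simp
      · rw [show PySem.Chars.replace.go old new (fuel+1) (c::t) acc
            = PySem.Chars.replace.go old new fuel t (c :: acc) by
          simp [PySem.Chars.replace.go, hp]]
        rw [show PySem.Chars.replace.go old new (t.length+1) (c::t) []
            = PySem.Chars.replace.go old new t.length t (c :: []) by
          simp [PySem.Chars.replace.go, hp]]
        rw [ih fuel (Nat.lt_succ_self _) t _ hlen,
            ih t.length (Nat.lt_succ_of_le hlen) t [c] le_rfl]
        simp

lemma replace_nil (old new : List Char) (hold : old ≠ []) :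
    PySem.Chars.replace [] old new = [] := by
  simp [PySem.Chars.replace, PySem.Chars.replace.go, List.isEmpty_iff, hold]

lemma replace_cons_pos (old new : List Char) (hold : old ≠ []) (c : Char) (t : List Char)
    (hp : old.isPrefixOf (c :: t)) :
    PySem.Chars.replace (c :: t) old new
      = new ++ PySem.Chars.replace (List.drop old.length (c :: t)) old new := by
  have hd : (List.drop old.length (c :: t)).length ≤ t.length := by
    have := List.length_pos_of_ne_nil hold; simp [List.length_drop]; omega
  simp only [PySem.Chars.replace, List.isEmpty_iff, hold]
  rw [show PySem.Chars.replace.go old new (c::t).length (c::t) []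
      = PySem.Chars.replace.go old new t.length (List.drop old.length (c::t)) (new.reverse ++ []) by
    simp [PySem.Chars.replace.go, hp]]
  rw [go_spec old new hold t.length _ _ hd]
  simp [List.length_drop]

lemma replace_cons_neg (old new : List Char) (hold : old ≠ []) (c : Char) (t : List Char)
    (hp : ¬ old.isPrefixOf (c :: t)) :
    PySem.Chars.replace (c :: t) old new = c :: PySem.Chars.replace t old new := by
  simp only [PySem.Chars.replace, List.isEmpty_iff, hold]
  rw [show PySem.Chars.replace.go old new (c::t).length (c::t) []
      = PySem.Chars.replace.go old new t.length t (c :: []) by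
    simp [PySem.Chars.replace.go, hp]]
  rw [go_spec old new hold t.length t [c] le_rfl]
  simp

-- a list with a given prefix is that prefix followed by the rest
lemma eq_append_drop_of_isPrefixOf {p l : List Char} (h : p.isPrefixOf l) :
    l = p ++ l.drop p.length := by
  obtain ⟨r, rfl⟩ := List.isPrefixOf_iff_prefix.mp h
  simp

-- a replace-by-"1" output starts with the input's first char or with '1'
lemma head?_replace_one (p : List Char) (hp : p ≠ []) (w : List Char) :
    (PySem.Chars.replace w p ['1']).head? = w.head? ∨
    (PySem.Chars.replace w p ['1']).head? = some '1' := by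
  rcases w with _ | ⟨c, t⟩
  · left; rw [replace_nil _ _ hp]
  · by_cases h : p.isPrefixOf (c :: t)
    · right; rw [replace_cons_pos _ _ hp _ _ h]; rfl
    · left; rw [replace_cons_neg _ _ hp _ _ h]; rfl

lemma head?_replace_one_ne (p : List Char) (hp : p ≠ []) {b : Char} (hb : b ≠ '1')
    {w : List Char} (h : w.head? ≠ some b) :
    (PySem.Chars.replace w p ['1']).head? ≠ some b := by
  rcases head?_replace_one p hp w with h' | h' <;> rw [h']
  · exact h
  · simp [Ne.symm hb]

-- pass lemma: first char differs from the pattern's first char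
lemma replace_pass (p r : List Char) (c : Char) (t : List Char)
    (h : p.head? ≠ some c) (hp : p ≠ []) :
    PySem.Chars.replace (c :: t) p r = c :: PySem.Chars.replace t p r := by
  rcases p with _ | ⟨p0, p'⟩
  · exact absurd rfl hp
  · refine replace_cons_neg _ _ hp _ _ ?_
    simp only [List.head?_cons, ne_eq, Option.some.injEq] at h
    simp [List.isPrefixOf, h]

lemma notPrefix_head {b : Char} (rest X : List Char) (h : X.head? ≠ some b) :
    ¬ (b :: rest).isPrefixOf X := by
  rcases X with _ | ⟨x, X'⟩
  · simp [List.isPrefixOf]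
  · simp only [List.head?_cons, ne_eq, Option.some.injEq] at h
    simp [List.isPrefixOf, Ne.symm h]

lemma notPrefix_two (a b : Char) (X : List Char) (h : X.head? ≠ some b) :
    ¬ [a, b].isPrefixOf (a :: X) := by
  intro hp
  rcases X with _ | ⟨x, X'⟩ <;> simp [List.isPrefixOf] at hp
  exact h (by simp [hp])

lemma head_ne_of_notPrefix_two {a b : Char} {t : List Char}
    (h : ¬ [a, b].isPrefixOf (a :: t)) : t.head? ≠ some b := by
  intro hh
  rcases t with _ | ⟨d, u⟩ <;> simp at hh
  exact h (by simp [List.isPrefixOf, hh])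

lemma pass_aya {c : Char} (h : c ≠ 'a') (t : List Char) :
    PySem.Chars.replace (c :: t) ['a','y','a'] ['1'] = c :: PySem.Chars.replace t ['a','y','a'] ['1'] :=
  replace_pass _ _ _ _ (by simp [Ne.symm h]) (by simp)
lemma pass_ye {c : Char} (h : c ≠ 'y') (t : List Char) :
    PySem.Chars.replace (c :: t) ['y','e'] ['1'] = c :: PySem.Chars.replace t ['y','e'] ['1'] :=
  replace_pass _ _ _ _ (by simp [Ne.symm h]) (by simp)
lemma pass_woo {c : Char} (h : c ≠ 'w') (t : List Char) :
    PySem.Chars.replace (c :: t) ['w','o','o'] ['1'] = c :: PySem.Chars.replace t ['w','o','o'] ['1'] :=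
  replace_pass _ _ _ _ (by simp [Ne.symm h]) (by simp)
lemma pass_ma {c : Char} (h : c ≠ 'm') (t : List Char) :
    PySem.Chars.replace (c :: t) ['m','a'] ['1'] = c :: PySem.Chars.replace t ['m','a'] ['1'] :=
  replace_pass _ _ _ _ (by simp [Ne.symm h]) (by simp)
lemma pass_oneE {c : Char} (h : c ≠ '1') (t : List Char) :
    PySem.Chars.replace (c :: t) ['1'] [] = c :: PySem.Chars.replace t ['1'] [] :=
  replace_pass _ _ _ _ (by simp [Ne.symm h]) (by simp)

lemma cons_aya (t : List Char) :
    PySem.Chars.replace ('a'::'y'::'a'::t) ['a','y','a'] ['1']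
      = '1' :: PySem.Chars.replace t ['a','y','a'] ['1'] := by
  rw [replace_cons_pos _ _ (by simp) _ _ (by simp [List.isPrefixOf])]; rfl
lemma cons_ye (t : List Char) :
    PySem.Chars.replace ('y'::'e'::t) ['y','e'] ['1'] = '1' :: PySem.Chars.replace t ['y','e'] ['1'] := by
  rw [replace_cons_pos _ _ (by simp) _ _ (by simp [List.isPrefixOf])]; rfl
lemma cons_woo (t : List Char) :
    PySem.Chars.replace ('w'::'o'::'o'::t) ['w','o','o'] ['1']
      = '1' :: PySem.Chars.replace t ['w','o','o'] ['1'] := by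
  rw [replace_cons_pos _ _ (by simp) _ _ (by simp [List.isPrefixOf])]; rfl
lemma cons_ma (t : List Char) :
    PySem.Chars.replace ('m'::'a'::t) ['m','a'] ['1'] = '1' :: PySem.Chars.replace t ['m','a'] ['1'] := by
  rw [replace_cons_pos _ _ (by simp) _ _ (by simp [List.isPrefixOf])]; rfl
lemma cons_oneE (t : List Char) :
    PySem.Chars.replace ('1'::t) ['1'] [] = PySem.Chars.replace t ['1'] [] := by
  rw [replace_cons_pos _ _ (by simp) _ _ (by simp [List.isPrefixOf])]; rfl

-- ¬(t starts "oo") survives the aya- and ye-passes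
lemma oo_preserve (t : List Char) (h : ¬ ['o','o'].isPrefixOf t) :
    ¬ ['o','o'].isPrefixOf
      (PySem.Chars.replace (PySem.Chars.replace t ['a','y','a'] ['1']) ['y','e'] ['1']) := by
  rcases t with _ | ⟨d, u⟩
  · rw [replace_nil _ _ (by simp), replace_nil _ _ (by simp)]; simp [List.isPrefixOf]
  · by_cases hd : d = 'o'
    · subst hd
      have hu : u.head? ≠ some 'o' := head_ne_of_notPrefix_two h
      rw [pass_aya (by decide), pass_ye (by decide)]
      have h2 : (PySem.Chars.replace (PySem.Chars.replace u ['a','y','a'] ['1']) ['y','e'] ['1']).head? ≠ some 'o' :=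
        head?_replace_one_ne _ (by simp) (by decide) (head?_replace_one_ne _ (by simp) (by decide) hu)
      exact notPrefix_two 'o' 'o' _ h2
    · have h1 : (PySem.Chars.replace (d::u) ['a','y','a'] ['1']).head? ≠ some 'o' :=
        head?_replace_one_ne _ (by simp) (by decide) (by simp [hd])
      have h2 : (PySem.Chars.replace (PySem.Chars.replace (d::u) ['a','y','a'] ['1']) ['y','e'] ['1']).head? ≠ some 'o' :=
        head?_replace_one_ne _ (by simp) (by decide) h1
      exact notPrefix_head _ _ h2

-- characterization of the greedy recognizer on a nonempty list
lemma okA1_char (l : List Char) (hl : l ≠ []) :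
    okA1 l = (if ['1'].isPrefixOf l then okA1 (l.drop 1)
      else if ['a','y','a'].isPrefixOf l then okA1 (l.drop 3)
      else if ['y','e'].isPrefixOf l then okA1 (l.drop 2)
      else if ['w','o','o'].isPrefixOf l then okA1 (l.drop 3)
      else if ['m','a'].isPrefixOf l then okA1 (l.drop 2)
      else false) := by
  by_cases h1 : ['1'].isPrefixOf l
  · rw [eq_append_drop_of_isPrefixOf h1]; simp [okA1, List.isPrefixOf]
  all_goals rw [if_neg h1]
  by_cases h2 : ['a','y','a'].isPrefixOf l
  · rw [eq_append_drop_of_isPrefixOf h2]; simp [okA1, List.isPrefixOf]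
  all_goals rw [if_neg h2]
  by_cases h3 : ['y','e'].isPrefixOf l
  · rw [eq_append_drop_of_isPrefixOf h3]; simp [okA1, List.isPrefixOf]
  all_goals rw [if_neg h3]
  by_cases h4 : ['w','o','o'].isPrefixOf l
  · rw [eq_append_drop_of_isPrefixOf h4]; simp [okA1, List.isPrefixOf]
  all_goals rw [if_neg h4]
  by_cases h5 : ['m','a'].isPrefixOf l
  · rw [eq_append_drop_of_isPrefixOf h5]; simp [okA1, List.isPrefixOf]
  all_goals rw [if_neg h5]
  rw [okA1.eq_def]
  split <;> simp_all [List.isPrefixOf]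

-- the A-pipeline, on char lists
def pipe (w : List Char) : List Char :=
  PySem.Chars.replace (PySem.Chars.replace (PySem.Chars.replace
    (PySem.Chars.replace w ['a','y','a'] ['1']) ['y','e'] ['1']) ['w','o','o'] ['1']) ['m','a'] ['1']

lemma pipe_ok : ∀ (n : Nat) (w : List Char), w.length ≤ n →
    (PySem.Chars.replace (pipe w) ['1'] [] = [] ↔ okA1 w = true) := by
  intro n
  induction n using Nat.strong_induction_on with
  | _ n ih =>
    intro w hw
    have IH : ∀ u : List Char, u.length < w.length →
        (PySem.Chars.replace (pipe u) ['1'] [] = [] ↔ okA1 u = true) :=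
      fun u hu => ih u.length (by omega) u le_rfl
    rcases w with _ | ⟨c, t⟩
    · have h0 : pipe [] = [] := by
        rw [pipe, replace_nil _ _ (by simp), replace_nil _ _ (by simp),
            replace_nil _ _ (by simp), replace_nil _ _ (by simp)]
      rw [h0, replace_nil _ _ (by simp)]
      simp [okA1]
    · rw [okA1_char _ (by simp)]
      by_cases hOne : ['1'].isPrefixOf (c :: t)
      · have hc : c = '1' := by
          have := eq_append_drop_of_isPrefixOf hOne
          simp at this
          exact this
        subst hc
        rw [if_pos hOne]
        have hpipe : pipe ('1' :: t) = '1' :: pipe t := by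
          rw [pipe, pipe, pass_aya (by decide), pass_ye (by decide), pass_woo (by decide),
              pass_ma (by decide)]
        rw [hpipe, cons_oneE]
        simpa using IH t (by simp)
      · rw [if_neg hOne]
        have hc1 : c ≠ '1' := by
          intro h; subst h; exact hOne (by simp [List.isPrefixOf])
        by_cases hA : ['a','y','a'].isPrefixOf (c :: t)
        · obtain ⟨r, hr⟩ := List.isPrefixOf_iff_prefix.mp hA
          simp only [List.cons_append, List.nil_append] at hr
          obtain ⟨hc, ht⟩ := List.cons.inj hr.symm
          subst hc; subst ht
          rw [if_pos hA]
          have hpipe : pipe ('a'::'y'::'a'::r) = '1' :: pipe r := by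
            rw [pipe, pipe, cons_aya, pass_ye (by decide), pass_woo (by decide), pass_ma (by decide)]
          rw [hpipe, cons_oneE]
          simpa using IH r (by simp only [List.length_cons]; omega)
        · rw [if_neg hA]
          by_cases hY : ['y','e'].isPrefixOf (c :: t)
          · obtain ⟨r, hr⟩ := List.isPrefixOf_iff_prefix.mp hY
            simp only [List.cons_append, List.nil_append] at hr
            obtain ⟨hc, ht⟩ := List.cons.inj hr.symm
            subst hc; subst ht
            rw [if_pos hY]
            have hpipe : pipe ('y'::'e'::r) = '1' :: pipe r := by
              rw [pipe, pipe, pass_aya (by decide), pass_aya (by decide), cons_ye,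
                  pass_woo (by decide), pass_ma (by decide)]
            rw [hpipe, cons_oneE]
            simpa using IH r (by simp only [List.length_cons]; omega)
          · rw [if_neg hY]
            by_cases hW : ['w','o','o'].isPrefixOf (c :: t)
            · obtain ⟨r, hr⟩ := List.isPrefixOf_iff_prefix.mp hW
              simp only [List.cons_append, List.nil_append] at hr
              obtain ⟨hc, ht⟩ := List.cons.inj hr.symm
              subst hc; subst ht
              rw [if_pos hW]
              have hpipe : pipe ('w'::'o'::'o'::r) = '1' :: pipe r := by
                rw [pipe, pipe, pass_aya (by decide), pass_aya (by decide), pass_aya (by decide),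
                    pass_ye (by decide), pass_ye (by decide), pass_ye (by decide), cons_woo,
                    pass_ma (by decide)]
              rw [hpipe, cons_oneE]
              simpa using IH r (by simp only [List.length_cons]; omega)
            · rw [if_neg hW]
              by_cases hM : ['m','a'].isPrefixOf (c :: t)
              · obtain ⟨r, hr⟩ := List.isPrefixOf_iff_prefix.mp hM
                simp only [List.cons_append, List.nil_append] at hr
                obtain ⟨hc, ht⟩ := List.cons.inj hr.symm
                subst hc; subst ht
                rw [if_pos hM]
                by_cases hya : ['y','a'].isPrefixOf r
                · -- "maya…": both sides false
                  obtain ⟨r2, hr2⟩ := List.isPrefixOf_iff_prefix.mp hya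
                  simp only [List.cons_append, List.nil_append] at hr2
                  subst hr2
                  have hpipe : pipe ('m'::'a'::'y'::'a'::r2)
                      = 'm' :: PySem.Chars.replace
                          ('1' :: PySem.Chars.replace (PySem.Chars.replace
                            (PySem.Chars.replace r2 ['a','y','a'] ['1']) ['y','e'] ['1']) ['w','o','o'] ['1'])
                          ['m','a'] ['1'] := by
                    rw [pipe, pass_aya (by decide), cons_aya, pass_ye (by decide), pass_ye (by decide),
                        pass_woo (by decide), pass_woo (by decide),
                        replace_cons_neg _ _ (by simp) _ _ (by simp [List.isPrefixOf])]
                  rw [hpipe, pass_oneE (by decide)]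
                  constructor
                  · intro h; simp at h
                  · intro h
                    rw [show okA1 (('m'::'a'::'y'::'a'::r2).drop 2) = false by
                      rw [okA1_char _ (by simp)]
                      rw [if_neg (by simp [List.isPrefixOf]), if_neg (by simp [List.isPrefixOf]),
                          if_neg (by simp [List.isPrefixOf]), if_neg (by simp [List.isPrefixOf]),
                          if_neg (by simp [List.isPrefixOf])]] at h
                    exact absurd h (by simp)
                · -- plain ma token
                  have hnA : ¬ ['a','y','a'].isPrefixOf ('a'::r) := by
                    intro hp
                    apply hya
                    obtain ⟨q, hq⟩ := List.isPrefixOf_iff_prefix.mp hp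
                    simp only [List.cons_append, List.nil_append] at hq
                    obtain ⟨-, hr'⟩ := List.cons.inj hq
                    rw [← hr']
                    simp [List.isPrefixOf]
                  have hpipe : pipe ('m'::'a'::r) = '1' :: pipe r := by
                    rw [pipe, pipe, pass_aya (by decide), replace_cons_neg _ _ (by simp) _ _ hnA,
                        pass_ye (by decide), pass_ye (by decide),
                        pass_woo (by decide), pass_woo (by decide), cons_ma]
                  rw [hpipe, cons_oneE]
                  simpa using IH r (by simp only [List.length_cons]; omega)
              · -- no token matches: pipeline keeps c, both sides false
                rw [if_neg hM]
                have S1 : PySem.Chars.replace (c::t) ['a','y','a'] ['1']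
                    = c :: PySem.Chars.replace t ['a','y','a'] ['1'] :=
                  replace_cons_neg _ _ (by simp) _ _ hA
                have hne2 : ¬ ['y','e'].isPrefixOf
                    (c :: PySem.Chars.replace t ['a','y','a'] ['1']) := by
                  by_cases hcy : c = 'y'
                  · subst hcy
                    have hte : t.head? ≠ some 'e' := head_ne_of_notPrefix_two hY
                    exact notPrefix_two 'y' 'e' _
                      (head?_replace_one_ne _ (by simp) (by decide) hte)
                  · exact notPrefix_head _ _ (by simpa using hcy)
                have S2 : PySem.Chars.replace (c :: PySem.Chars.replace t ['a','y','a'] ['1']) ['y','e'] ['1']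
                    = c :: PySem.Chars.replace (PySem.Chars.replace t ['a','y','a'] ['1']) ['y','e'] ['1'] :=
                  replace_cons_neg _ _ (by simp) _ _ hne2
                set Y := PySem.Chars.replace (PySem.Chars.replace t ['a','y','a'] ['1']) ['y','e'] ['1'] with hYdef
                have hne3 : ¬ ['w','o','o'].isPrefixOf (c :: Y) := by
                  by_cases hcw : c = 'w'
                  · subst hcw
                    have hoo : ¬ ['o','o'].isPrefixOf t := by
                      intro hp
                      exact hW (by
                        obtain ⟨q, hq⟩ := List.isPrefixOf_iff_prefix.mp hp
                        simp only [List.cons_append, List.nil_append] at hq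
                        rw [← hq]; simp [List.isPrefixOf])
                    intro hp
                    apply oo_preserve t hoo
                    simpa [List.isPrefixOf_cons₂] using hp
                  · exact notPrefix_head _ _ (by simpa using hcw)
                have S3 : PySem.Chars.replace (c :: Y) ['w','o','o'] ['1']
                    = c :: PySem.Chars.replace Y ['w','o','o'] ['1'] :=
                  replace_cons_neg _ _ (by simp) _ _ hne3
                set Z := PySem.Chars.replace Y ['w','o','o'] ['1'] with hZdef
                have hne4 : ¬ ['m','a'].isPrefixOf (c :: Z) := by
                  by_cases hcm : c = 'm'
                  · subst hcm
                    have hta : t.head? ≠ some 'a' := head_ne_of_notPrefix_two hM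
                    exact notPrefix_two 'm' 'a' _
                      (head?_replace_one_ne _ (by simp) (by decide)
                        (head?_replace_one_ne _ (by simp) (by decide)
                          (head?_replace_one_ne _ (by simp) (by decide) hta)))
                  · exact notPrefix_head _ _ (by simpa using hcm)
                have S4 : PySem.Chars.replace (c :: Z) ['m','a'] ['1']
                    = c :: PySem.Chars.replace Z ['m','a'] ['1'] :=
                  replace_cons_neg _ _ (by simp) _ _ hne4
                have hpipe : pipe (c :: t) = c :: PySem.Chars.replace Z ['m','a'] ['1'] := by
                  rw [pipe, S1, S2, S3, S4]
                rw [hpipe, pass_oneE hc1]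
                simp

lemma drop_shift (w : List Char) (i k : Nat) : (w.drop i).drop k = w.drop (i+k) := by
  rw [List.drop_drop]

lemma okLoop_no_one (w : List Char) : ∀ (fuel i : Nat), w.length - i ≤ fuel →
    okLoop w fuel i = true → '1' ∉ w.drop i := by
  intro fuel
  induction fuel with
  | zero =>
    intro i hf _
    have : w.length ≤ i := by omega
    simp [List.drop_eq_nil_of_le this]
  | succ fuel ih =>
    intro i hf hok
    by_cases hi : i < w.length
    · rw [okLoop, if_pos hi] at hok
      split_ifs at hok with hA hY hW hM
      · have hsub := ih (i+3) (by omega) hok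
        rw [eq_append_drop_of_isPrefixOf hA]
        simp only [List.length_cons, List.length_nil]
        rw [drop_shift]
        simp [hsub]
      · have hsub := ih (i+2) (by omega) hok
        rw [eq_append_drop_of_isPrefixOf hY]
        simp only [List.length_cons, List.length_nil]
        rw [drop_shift]
        simp [hsub]
      · have hsub := ih (i+3) (by omega) hok
        rw [eq_append_drop_of_isPrefixOf hW]
        simp only [List.length_cons, List.length_nil]
        rw [drop_shift]
        simp [hsub]
      · have hsub := ih (i+2) (by omega) hok
        rw [eq_append_drop_of_isPrefixOf hM]
        simp only [List.length_cons, List.length_nil]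
        rw [drop_shift]
        simp [hsub]
    · simp [List.drop_eq_nil_of_le (by omega : w.length ≤ i)]

lemma okLoop_eq_okA1 (w : List Char) : ∀ (fuel i : Nat), w.length - i ≤ fuel →
    '1' ∉ w.drop i → okLoop w fuel i = okA1 (w.drop i) := by
  intro fuel
  induction fuel with
  | zero =>
    intro i hf _
    have : w.length ≤ i := by omega
    simp [List.drop_eq_nil_of_le this, okLoop, okA1]
    omega
  | succ fuel ih =>
    intro i hf hone
    by_cases hi : i < w.length
    · have hne : w.drop i ≠ [] := by
        intro h; have := List.drop_eq_nil_iff.mp h; omega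
      rw [okLoop, if_pos hi, okA1_char _ hne]
      have hOne : ¬ ['1'].isPrefixOf (w.drop i) := by
        intro h
        exact hone (by rw [eq_append_drop_of_isPrefixOf h]; simp)
      rw [if_neg hOne]
      have hmem : ∀ k, '1' ∉ w.drop (i+k) := by
        intro k hk
        exact hone (List.drop_subset k (w.drop i) (by rwa [drop_shift]))
      split_ifs with hA hY hW hM
      · rw [drop_shift]; exact ih (i+3) (by omega) (hmem 3)
      · rw [drop_shift]; exact ih (i+2) (by omega) (hmem 2)
      · rw [drop_shift]; exact ih (i+3) (by omega) (hmem 3)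
      · rw [drop_shift]; exact ih (i+2) (by omega) (hmem 2)
      · rfl
    · have h1 : w.length ≤ i := by omega
      simp [List.drop_eq_nil_of_le h1, okLoop, okA1]
      omega

lemma beq_empty_eq (s : String) : (s == "") = decide (s.toList = []) := by
  rcases h : s == "" with _ | _
  · have : s ≠ "" := by simpa using h
    simp [String.toList_eq_nil_iff, this]
  · have : s = "" := by simpa using h
    simp [this]

lemma elem_ok (s : String) :
    (PySem.Str.replace (PySem.Str.replace (PySem.Str.replace (PySem.Str.replace
        (PySem.Str.replace s "aya" "1") "ye" "1") "woo" "1") "ma" "1") "1" "" == "")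
      = okA1 s.toList := by
  rw [beq_empty_eq]
  have hl : (PySem.Str.replace (PySem.Str.replace (PySem.Str.replace (PySem.Str.replace
      (PySem.Str.replace s "aya" "1") "ye" "1") "woo" "1") "ma" "1") "1" "").toList
      = PySem.Chars.replace (pipe s.toList) ['1'] [] := by
    simp [PySem.Str.replace, pipe]
  rw [hl]
  rcases h : okA1 s.toList
  · simp only [decide_eq_false_iff_not]
    intro hc
    have := (pipe_ok s.toList.length s.toList le_rfl).mp hc
    simp [h] at this
  · simp only [decide_eq_true_eq]
    exact (pipe_ok s.toList.length s.toList le_rfl).mpr h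

lemma solution_eq_countP (babbling : List String) :
    solution babbling = ((babbling.countP (fun s => okA1 s.toList) : Nat) : Int) := by
  unfold solution
  simp only [List.foldl_cons, List.foldl_nil]
  rw [PySem.List.foldl_append_singleton_eq_map]
  rw [PySem.List.count_eq, List.count_eq_countP]
  simp only [List.nil_append]
  rw [List.countP_map]
  simp only [Function.comp_def]
  simp only [elem_ok]

lemma solution_alt_eq_countP (babbling : List String) :
    solution_alt babbling
      = ((babbling.countP (fun s => okLoop s.toList s.toList.length 0) : Nat) : Int) := by
  unfold solution_alt
  rw [PySem.List.foldl_if_add_one]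
  simp

lemma point_split (s : String) :
    (if okA1 s.toList then (1:Nat) else 0)
      = (if okLoop s.toList s.toList.length 0 then (1:Nat) else 0)
        + (if decide ('1' ∈ s.toList) && okA1 s.toList then (1:Nat) else 0) := by
  by_cases h1 : '1' ∈ s.toList
  · have hB : okLoop s.toList s.toList.length 0 = false := by
      rcases h : okLoop s.toList s.toList.length 0
      · rfl
      · have := okLoop_no_one s.toList s.toList.length 0 (by omega) h
        simp at this
        exact absurd h1 this
    rw [hB]; simp [h1]
  · have hB : okLoop s.toList s.toList.length 0 = okA1 s.toList := by
      have := okLoop_eq_okA1 s.toList s.toList.length 0 (by omega) (by simpa using h1)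
      simpa using this
    rw [hB]; simp [h1]

lemma countP_split (babbling : List String) :
    babbling.countP (fun s => okA1 s.toList)
      = babbling.countP (fun s => okLoop s.toList s.toList.length 0)
        + babbling.countP (fun s => decide ('1' ∈ s.toList) && okA1 s.toList) := by
  induction babbling with
  | nil => simp
  | cons x l ih =>
    simp only [List.countP_cons, ih]
    have := point_split x
    omega

-- ===== VERDICT =====
theorem solution_spec : Claim_unchanged_solution := by
  intro babbling _
  unfold Spec_solution
  intro hnD
  rw [solution_eq_countP, solution_alt_eq_countP, countP_split]
  have hz : babbling.countP (fun s => decide ('1' ∈ s.toList) && okA1 s.toList) = 0 := by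
    rw [List.countP_eq_zero]
    intro s hs
    simp only [Bool.and_eq_true, decide_eq_true_eq, not_and]
    intro h1 hok
    exact absurd ⟨s, hs, h1, hok⟩ hnD
  rw [hz]
  simp

theorem solution_changed : Claim_changed_solution := by
  unfold Claim_changed_solution; decide

theorem solution_tight : Claim_exact_solution := by
  intro babbling _ hD
  rw [solution_eq_countP, solution_alt_eq_countP, countP_split]
  have hpos : 0 < babbling.countP (fun s => decide ('1' ∈ s.toList) && okA1 s.toList) := by
    rw [List.countP_pos_iff]
    obtain ⟨w, hw, h1, hok⟩ := hD
    exact ⟨w, hw, by simp [h1, hok]⟩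
  omega
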